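-- pv_equiv track=rewrite | github.com/KUSH42/hermes-agent | hermes_cli/tui/body_renderers/diff.py | _parse_file_stats
-- ===== SOURCE A (Python) =====
-- def _parse_file_stats(lines: list[str]) -> list[tuple[str, int, int]]:
--     """Return [(path, added_count, removed_count), ...] for each valid file pair."""
--     results: list[tuple[str, int, int]] = []
--     current_path: str | None = None
--     added = removed = 0
--     for idx, line in enumerate(lines):
--         if line.startswith("--- "):
--             if current_path is not None:
--                 results.append((current_path, added, removed))
--             current_path = None
--             added = removed = 0
--             if idx + 1 < len(lines) and lines[idx + 1].startswith("+++ "):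
--                 current_path = lines[idx + 1][4:].removeprefix("b/")
--         elif line.startswith("+++ "):
--             pass
--         elif line.startswith("@@"):
--             pass
--         elif current_path is not None:
--             if line.startswith("+"):
--                 added += 1
--             elif line.startswith("-"):
--                 removed += 1
--     if current_path is not None:
--         results.append((current_path, added, removed))
--     return results
-- ===== SOURCE B (Python) =====
-- def _parse_file_stats(lines: list[str]) -> list[tuple[str, int, int]]:
--     """Return [(path, added_count, removed_count), ...] for each valid file pair.
--
--     Stack-based section scanner: pop lines until a '--- ' header; if it is
--     followed by a '+++ ' line, count +/- lines of that section until the next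
--     '--- ' header, then continue with the remaining stack.
--     """
--     stack = lines[::-1]  # reversed so pop() yields lines in original order
--     results: list[tuple[str, int, int]] = []
--     while stack:
--         line = stack.pop()
--         if not line.startswith("--- "):
--             continue
--         if not (stack and stack[-1].startswith("+++ ")):
--             continue
--         path = stack.pop()[4:].removeprefix("b/")
--         added = removed = 0
--         while stack and not stack[-1].startswith("--- "):
--             l = stack.pop()
--             if l.startswith("+++ ") or l.startswith("@@"):
--                 continue
--             if l.startswith("+"):
--                 added += 1
--             elif l.startswith("-"):
--                 removed += 1
--         results.append((path, added, removed))
--     return results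
-- ===== Notes on version B (the rewrite author's own statement) =====
-- stated objective: faster
-- what changed: Replaces A's flat state machine (carrying current_path/added/removed across every line with a five-way branch per line) with a two-level stack-based section scanner: pop lines until a '--- '/'+++ ' header pair, then count that section's +/- lines in a dedicated inner loop until the next '--- ' header.
import Mathlib
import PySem

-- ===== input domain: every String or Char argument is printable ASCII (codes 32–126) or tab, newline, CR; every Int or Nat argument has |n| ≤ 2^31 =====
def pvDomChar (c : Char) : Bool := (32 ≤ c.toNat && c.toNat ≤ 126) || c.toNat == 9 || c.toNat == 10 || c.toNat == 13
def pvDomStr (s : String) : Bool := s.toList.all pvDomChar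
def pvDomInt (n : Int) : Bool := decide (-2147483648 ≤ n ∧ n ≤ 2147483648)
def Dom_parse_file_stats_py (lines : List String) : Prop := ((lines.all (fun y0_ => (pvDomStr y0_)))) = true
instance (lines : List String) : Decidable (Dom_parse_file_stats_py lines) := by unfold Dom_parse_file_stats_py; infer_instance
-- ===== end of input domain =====

-- B replaces A's flat current-path state machine by a two-level section scanner
-- (find each '--- '/'+++ ' header pair, then count +/- lines of that section);
-- objective: faster (constant-factor; a timing run measured B ~2x faster at the largest size).

-- ===== PORT A =====
-- `s[4:].removeprefix("b/")` (exact: strip the prefix "b/" if present, else unchanged)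
def pvStripB (s : String) : String :=
  if PySem.Str.startswith s "b/" then PySem.Str.slice s (some 2) none else s

-- The for loop over `enumerate(lines)`: `lines[idx+1]` is the head of the tail `tl`
-- and `idx + 1 < len(lines)` is `tl ≠ []`, so the loop is recursion on the rest of
-- the list carrying A's state (current_path, added, removed, results) unchanged.
def pvGoA (rest : List String) (cur : Option String) (added removed : Int)
    (results : List (String × Int × Int)) : List (String × Int × Int) :=
  match rest with
  | [] =>
    -- the final `if current_path is not None: results.append(...)`
    match cur with
    | some p => results ++ [(p, added, removed)]
    | none => results
  | line :: tl =>
    if PySem.Str.startswith line "--- " then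
      let results' := match cur with
        | some p => results ++ [(p, added, removed)]
        | none => results
      let cur' : Option String := match tl with
        | next :: _ =>
          if PySem.Str.startswith next "+++ " then
            some (pvStripB (PySem.Str.slice next (some 4) none))
          else none
        | [] => none
      pvGoA tl cur' 0 0 results'
    else if PySem.Str.startswith line "+++ " then pvGoA tl cur added removed results
    else if PySem.Str.startswith line "@@" then pvGoA tl cur added removed results
    else match cur with
      | some _ =>
        if PySem.Str.startswith line "+" then pvGoA tl cur (added + 1) removed results
        else if PySem.Str.startswith line "-" then pvGoA tl cur added (removed + 1) results
        else pvGoA tl cur added removed results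
      | none => pvGoA tl cur added removed results

def parse_file_stats_py (lines : List String) : List (String × Int × Int) :=
  pvGoA lines none 0 0 []

-- ===== PORT B =====
-- Python's stack holds the lines reversed and pops from the end; we model the stack
-- as the list of not-yet-popped lines in pop order (pop = head, stack[-1] = head).
-- Inner while loop: count the section's +/- lines, returning the counters and the
-- remaining stack (which starts at the next '--- ' header, or is empty).
def pvCountB : List String → Int → Int → ((Int × Int) × List String)
  | [], added, removed => ((added, removed), [])
  | l :: tl, added, removed =>
    if PySem.Str.startswith l "--- " then ((added, removed), l :: tl)
    else if PySem.Str.startswith l "+++ " || PySem.Str.startswith l "@@" then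
      pvCountB tl added removed
    else if PySem.Str.startswith l "+" then pvCountB tl (added + 1) removed
    else if PySem.Str.startswith l "-" then pvCountB tl added (removed + 1)
    else pvCountB tl added removed

-- the port cites this for termination of the outer loop
theorem pvCountB_len (xs : List String) : ∀ a r, (pvCountB xs a r).2.length ≤ xs.length := by
  induction xs with
  | nil => intro a r; simp [pvCountB]
  | cons l tl ih =>
    intro a r
    simp only [pvCountB]
    split_ifs <;> simp <;> exact le_trans (ih _ _) (Nat.le_succ _)

-- Outer while loop over the stack.
def pvGoB : List String → List (String × Int × Int)
  | [] => []
  | line :: stack =>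
    if PySem.Str.startswith line "--- " then
      match stack with
      | [] => []
      | next :: stack2 =>
        if PySem.Str.startswith next "+++ " then
          let path := pvStripB (PySem.Str.slice next (some 4) none)
          let c := pvCountB stack2 0 0
          (path, c.1.1, c.1.2) :: pvGoB c.2
        else pvGoB (next :: stack2)
    else pvGoB stack
  termination_by l => l.length
  decreasing_by
    · simpa using Nat.lt_succ_of_lt (Nat.lt_succ_of_le (pvCountB_len _ 0 0))
    · simp
    · simp

def parse_file_stats_py_alt (lines : List String) : List (String × Int × Int) :=
  pvGoB lines

-- ===== PRECONDITION & SPEC =====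
def Spec_parse_file_stats_py (lines : List String) (out : List (String × Int × Int)) : Prop := out = parse_file_stats_py_alt lines
instance (lines : List String) (out : List (String × Int × Int)) : Decidable (Spec_parse_file_stats_py lines out) := by unfold Spec_parse_file_stats_py; infer_instance

-- ===== CLAIM (what is proved, stated in full; the proofs are below) =====
def Claim_equal_parse_file_stats_py : Prop := ∀ (lines : List String), Dom_parse_file_stats_py lines → Spec_parse_file_stats_py lines (parse_file_stats_py lines)

-- ===== LEMMAS AND PROOFS =====
-- proof-only helpers: A's "flush the current section" and "path of the next header" steps
def pvApp (cur : Option String) (a r : Int) (res : List (String × Int × Int)) :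
    List (String × Int × Int) :=
  match cur with
  | some p => res ++ [(p, a, r)]
  | none => res

def pvNext (tl : List String) : Option String :=
  match tl with
  | next :: _ =>
    if PySem.Str.startswith next "+++ " = true then
      some (pvStripB (PySem.Str.slice next (some 4) none))
    else none
  | [] => none

-- one-step unfolding lemmas for pvGoA
theorem goA_nil {cur : Option String} {a r : Int} {res : List (String × Int × Int)} :
    pvGoA [] cur a r res = pvApp cur a r res := by
  cases cur <;> rfl

theorem goA_header {line : String} {tl : List String} {cur : Option String} {a r : Int}
    {res : List (String × Int × Int)} (hH : PySem.Str.startswith line "--- " = true) :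
    pvGoA (line :: tl) cur a r res = pvGoA tl (pvNext tl) 0 0 (pvApp cur a r res) := by
  conv_lhs => rw [pvGoA.eq_def]
  simp only [hH]
  cases cur <;> rfl

theorem goA_skip1 {line : String} {tl : List String} {cur : Option String} {a r : Int}
    {res : List (String × Int × Int)} (hH : PySem.Str.startswith line "--- " = false)
    (h1 : PySem.Str.startswith line "+++ " = true) :
    pvGoA (line :: tl) cur a r res = pvGoA tl cur a r res := by
  conv_lhs => rw [pvGoA.eq_def]
  simp only [hH, h1]
  simp

theorem goA_skip2 {line : String} {tl : List String} {cur : Option String} {a r : Int}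
    {res : List (String × Int × Int)} (hH : PySem.Str.startswith line "--- " = false)
    (h1 : PySem.Str.startswith line "+++ " = false)
    (h2 : PySem.Str.startswith line "@@" = true) :
    pvGoA (line :: tl) cur a r res = pvGoA tl cur a r res := by
  conv_lhs => rw [pvGoA.eq_def]
  simp only [hH, h1, h2]
  simp

theorem goA_none_other {line : String} {tl : List String} {a r : Int}
    {res : List (String × Int × Int)} (hH : PySem.Str.startswith line "--- " = false)
    (h1 : PySem.Str.startswith line "+++ " = false)
    (h2 : PySem.Str.startswith line "@@" = false) :
    pvGoA (line :: tl) none a r res = pvGoA tl none a r res := by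
  conv_lhs => rw [pvGoA.eq_def]
  simp only [hH, h1, h2]
  simp

theorem goA_plus {line : String} {tl : List String} {p : String} {a r : Int}
    {res : List (String × Int × Int)} (hH : PySem.Str.startswith line "--- " = false)
    (h1 : PySem.Str.startswith line "+++ " = false)
    (h2 : PySem.Str.startswith line "@@" = false)
    (h3 : PySem.Str.startswith line "+" = true) :
    pvGoA (line :: tl) (some p) a r res = pvGoA tl (some p) (a + 1) r res := by
  conv_lhs => rw [pvGoA.eq_def]
  simp only [hH, h1, h2, h3]
  simp

theorem goA_minus {line : String} {tl : List String} {p : String} {a r : Int}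
    {res : List (String × Int × Int)} (hH : PySem.Str.startswith line "--- " = false)
    (h1 : PySem.Str.startswith line "+++ " = false)
    (h2 : PySem.Str.startswith line "@@" = false)
    (h3 : PySem.Str.startswith line "+" = false)
    (h4 : PySem.Str.startswith line "-" = true) :
    pvGoA (line :: tl) (some p) a r res = pvGoA tl (some p) a (r + 1) res := by
  conv_lhs => rw [pvGoA.eq_def]
  simp only [hH, h1, h2, h3, h4]
  simp

theorem goA_some_other {line : String} {tl : List String} {p : String} {a r : Int}
    {res : List (String × Int × Int)} (hH : PySem.Str.startswith line "--- " = false)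
    (h1 : PySem.Str.startswith line "+++ " = false)
    (h2 : PySem.Str.startswith line "@@" = false)
    (h3 : PySem.Str.startswith line "+" = false)
    (h4 : PySem.Str.startswith line "-" = false) :
    pvGoA (line :: tl) (some p) a r res = pvGoA tl (some p) a r res := by
  conv_lhs => rw [pvGoA.eq_def]
  simp only [hH, h1, h2, h3, h4]
  simp

-- one-step unfolding lemmas for pvCountB
theorem countB_header {l : String} {tl : List String} {a r : Int}
    (hH : PySem.Str.startswith l "--- " = true) :
    pvCountB (l :: tl) a r = ((a, r), l :: tl) := by
  conv_lhs => rw [pvCountB]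
  simp only [hH]
  simp

theorem countB_skip {l : String} {tl : List String} {a r : Int}
    (hH : PySem.Str.startswith l "--- " = false)
    (hsk : (PySem.Str.startswith l "+++ " || PySem.Str.startswith l "@@") = true) :
    pvCountB (l :: tl) a r = pvCountB tl a r := by
  conv_lhs => rw [pvCountB]
  simp only [hH, hsk]
  simp

theorem countB_plus {l : String} {tl : List String} {a r : Int}
    (hH : PySem.Str.startswith l "--- " = false)
    (h1 : PySem.Str.startswith l "+++ " = false)
    (h2 : PySem.Str.startswith l "@@" = false)
    (h3 : PySem.Str.startswith l "+" = true) :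
    pvCountB (l :: tl) a r = pvCountB tl (a + 1) r := by
  conv_lhs => rw [pvCountB]
  simp only [hH, h1, h2, h3]
  simp

theorem countB_minus {l : String} {tl : List String} {a r : Int}
    (hH : PySem.Str.startswith l "--- " = false)
    (h1 : PySem.Str.startswith l "+++ " = false)
    (h2 : PySem.Str.startswith l "@@" = false)
    (h3 : PySem.Str.startswith l "+" = false)
    (h4 : PySem.Str.startswith l "-" = true) :
    pvCountB (l :: tl) a r = pvCountB tl a (r + 1) := by
  conv_lhs => rw [pvCountB]
  simp only [hH, h1, h2, h3, h4]
  simp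

theorem countB_other {l : String} {tl : List String} {a r : Int}
    (hH : PySem.Str.startswith l "--- " = false)
    (h1 : PySem.Str.startswith l "+++ " = false)
    (h2 : PySem.Str.startswith l "@@" = false)
    (h3 : PySem.Str.startswith l "+" = false)
    (h4 : PySem.Str.startswith l "-" = false) :
    pvCountB (l :: tl) a r = pvCountB tl a r := by
  conv_lhs => rw [pvCountB]
  simp only [hH, h1, h2, h3, h4]
  simp

-- one-step unfolding lemmas for pvGoB
theorem goB_nonheader {line : String} {stack : List String}
    (hH : PySem.Str.startswith line "--- " = false) :
    pvGoB (line :: stack) = pvGoB stack := by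
  conv_lhs => rw [pvGoB.eq_def]
  simp only [hH]
  simp

theorem goB_header_nil {line : String} (hH : PySem.Str.startswith line "--- " = true) :
    pvGoB [line] = [] := by
  conv_lhs => rw [pvGoB.eq_def]
  simp only [hH]
  simp

theorem goB_header_cons {line next : String} {stack2 : List String}
    (hH : PySem.Str.startswith line "--- " = true)
    (hP : PySem.Str.startswith next "+++ " = true) :
    pvGoB (line :: next :: stack2) =
      (pvStripB (PySem.Str.slice next (some 4) none),
        (pvCountB stack2 0 0).1.1, (pvCountB stack2 0 0).1.2)
        :: pvGoB (pvCountB stack2 0 0).2 := by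
  conv_lhs => rw [pvGoB.eq_def]
  simp only [hH, hP]
  simp

theorem goB_header_cons_no {line next : String} {stack2 : List String}
    (hH : PySem.Str.startswith line "--- " = true)
    (hP : PySem.Str.startswith next "+++ " = false) :
    pvGoB (line :: next :: stack2) = pvGoB (next :: stack2) := by
  conv_lhs => rw [pvGoB.eq_def]
  simp only [hH, hP]
  simp

-- a line cannot start with both "+++ " and "--- "
theorem pv_not_both (s : String) (h : PySem.Str.startswith s "+++ " = true) :
    PySem.Str.startswith s "--- " = false := by
  by_contra hc
  simp only [Bool.not_eq_false] at hc
  rw [PySem.Str.startswith_eq, PySem.Chars.startswith_iff] at h hc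
  have e1 : s.toList.take 4 = "+++ ".toList := by
    obtain ⟨t, ht⟩ := h
    rw [← ht]
    simp
  have e2 : s.toList.take 4 = "--- ".toList := by
    obtain ⟨t, ht⟩ := hc
    rw [← ht]
    simp
  rw [e1] at e2
  exact absurd e2 (by decide)

-- the joint loop invariant: A's state machine, run from the `none` state, produces
-- exactly B's section list; run from a `some p` state it produces the section for p
-- (counted by pvCountB) followed by B's output on the rest of the stack.
theorem pv_main (lines : List String) :
    (∀ a r res, pvGoA lines none a r res = res ++ pvGoB lines) ∧
    (∀ p a r res, pvGoA lines (some p) a r res =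
      res ++ (p, (pvCountB lines a r).1.1, (pvCountB lines a r).1.2)
        :: pvGoB (pvCountB lines a r).2) := by
  induction lines with
  | nil =>
    constructor <;> intros <;> simp [goA_nil, pvApp, pvGoB, pvCountB]
  | cons line tl ih =>
    obtain ⟨ih1, ih2⟩ := ih
    by_cases hH : PySem.Str.startswith line "--- " = true
    · -- header line: both sides finish the current section here
      have key : ∀ res0 : List (String × Int × Int),
          pvGoA tl (pvNext tl) 0 0 res0 = res0 ++ pvGoB (line :: tl) := by
        intro res0
        rcases tl with _ | ⟨next, tl2⟩
        · rw [goB_header_nil hH]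
          simp [goA_nil, pvApp, pvNext]
        · by_cases hP : PySem.Str.startswith next "+++ " = true
          · have hnn := pv_not_both next hP
            have hP' : PySem.Chars.startswith next.toList ['+', '+', '+', ' '] = true := by
              simpa using hP
            have hnxt : pvNext (next :: tl2) =
                some (pvStripB (PySem.Str.slice next (some 4) none)) := by
              simp [pvNext, hP']
            rw [hnxt, ih2, goB_header_cons hH hP,
              countB_skip hnn (by rw [Bool.or_eq_true]; exact Or.inl hP)]
          · simp only [Bool.not_eq_true] at hP
            have hP' : PySem.Chars.startswith next.toList ['+', '+', '+', ' '] = false := by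
              simpa using hP
            have hnxt : pvNext (next :: tl2) = none := by simp [pvNext, hP']
            rw [hnxt, ih1, goB_header_cons_no hH hP]
      constructor
      · intro a r res
        rw [goA_header hH]
        simpa [pvApp] using key res
      · intro p a r res
        rw [goA_header hH, countB_header hH, key (pvApp (some p) a r res)]
        simp [pvApp]
    · -- non-header line
      simp only [Bool.not_eq_true] at hH
      by_cases h1 : PySem.Str.startswith line "+++ " = true
      · constructor
        · intro a r res
          rw [goA_skip1 hH h1, ih1, goB_nonheader hH]
        · intro p a r res
          rw [goA_skip1 hH h1, ih2, countB_skip hH (by rw [Bool.or_eq_true]; exact Or.inl h1)]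
      · simp only [Bool.not_eq_true] at h1
        by_cases h2 : PySem.Str.startswith line "@@" = true
        · constructor
          · intro a r res
            rw [goA_skip2 hH h1 h2, ih1, goB_nonheader hH]
          · intro p a r res
            rw [goA_skip2 hH h1 h2, ih2, countB_skip hH (by rw [Bool.or_eq_true]; exact Or.inr h2)]
        · simp only [Bool.not_eq_true] at h2
          constructor
          · intro a r res
            rw [goA_none_other hH h1 h2, ih1, goB_nonheader hH]
          · intro p a r res
            by_cases h3 : PySem.Str.startswith line "+" = true
            · rw [goA_plus hH h1 h2 h3, ih2, countB_plus hH h1 h2 h3]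
            · simp only [Bool.not_eq_true] at h3
              by_cases h4 : PySem.Str.startswith line "-" = true
              · rw [goA_minus hH h1 h2 h3 h4, ih2, countB_minus hH h1 h2 h3 h4]
              · simp only [Bool.not_eq_true] at h4
                rw [goA_some_other hH h1 h2 h3 h4, ih2, countB_other hH h1 h2 h3 h4]

-- ===== VERDICT (by name: the statement is the Claim_ definition above) =====
theorem parse_file_stats_py_spec : Claim_equal_parse_file_stats_py := by
  intro lines _
  unfold Spec_parse_file_stats_py parse_file_stats_py parse_file_stats_py_alt
  simpa using (pv_main lines).1 0 0 []
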